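-- pv_equiv track=rewrite | github.com/GritCoder/LeetCode | 第一周/数组个数.py | best_solution
-- ===== SOURCE A (Python) =====
-- def best_solution(arr, k, threshold):
--     res = [0] # 这个0写的太妙了，没有不行
--     ans = 0
--     for i in range(len(arr)):
--         res.append(res[-1] + arr[i])
--     for i in range(len(res) - k): # 与自己解法不一样，不用k-1，因为数组长度比原来多1
--         b = res[i + k] # 滑动窗口思想
--         a = res[i]
--         if (b - a) >= threshold:
--             ans += 1
--     return ans
-- ===== SOURCE B (Python) =====
-- def best_solution(arr, k, threshold):
--     n = len(arr)
--     if k > n: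
--         return 0
--     s = sum(arr[:k])
--     ans = 1 if s >= threshold else 0
--     for i in range(k, n):
--         s += arr[i] - arr[i - k]
--         if s >= threshold:
--             ans += 1
--     return ans
-- ===== Notes on version B (the rewrite author's own statement) =====
-- stated objective: simpler
-- what changed: B drops A's full prefix-sum array and keeps only a single running window sum updated as s += arr[i] - arr[i-k], counting as it slides.
import Mathlib
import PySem

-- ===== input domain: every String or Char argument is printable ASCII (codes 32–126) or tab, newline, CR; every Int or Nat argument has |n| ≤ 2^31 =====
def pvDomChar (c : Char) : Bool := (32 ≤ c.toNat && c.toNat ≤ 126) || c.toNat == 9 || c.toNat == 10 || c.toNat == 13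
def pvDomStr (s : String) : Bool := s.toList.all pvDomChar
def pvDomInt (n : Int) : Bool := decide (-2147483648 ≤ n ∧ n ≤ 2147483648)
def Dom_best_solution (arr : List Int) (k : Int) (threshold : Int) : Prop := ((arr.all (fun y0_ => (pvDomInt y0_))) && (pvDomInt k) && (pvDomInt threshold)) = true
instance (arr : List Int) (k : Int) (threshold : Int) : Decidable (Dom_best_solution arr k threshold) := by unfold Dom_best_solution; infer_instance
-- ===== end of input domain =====

-- B replaces A's full prefix-sum array with a single running window sum (O(1) extra space, simpler).

-- ===== PORT A =====
-- res = [0]; for i in range(len(arr)): res.append(res[-1] + arr[i])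
-- for i in range(len(res) - k): b = res[i+k]; a = res[i]; if (b - a) >= threshold: ans += 1
def best_solution (arr : List Int) (k : Int) (threshold : Int) : Int :=
  let res := (PySem.List.pyRange 0 (PySem.List.len arr) 1).foldl
      (fun res i => res ++ [PySem.List.pyGetD res (-1) 0 + PySem.List.pyGetD arr i 0]) [(0 : Int)]
  (PySem.List.pyRange 0 ((PySem.List.len res) - k) 1).foldl
      (fun ans i =>
        let b := PySem.List.pyGetD res (i + k) 0
        let a := PySem.List.pyGetD res i 0
        if b - a ≥ threshold then ans + 1 else ans) 0

-- ===== PORT B =====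
-- n = len(arr); if k > n: return 0
-- s = sum(arr[:k]); ans = 1 if s >= threshold else 0
-- for i in range(k, n): s += arr[i] - arr[i-k]; if s >= threshold: ans += 1
def best_solution_alt (arr : List Int) (k : Int) (threshold : Int) : Int :=
  let n := PySem.List.len arr
  if k > n then 0
  else
    let s : Int := (PySem.List.slice arr none (some k)).sum
    let ans : Int := if s ≥ threshold then 1 else 0
    ((PySem.List.pyRange k n 1).foldl
      (fun (p : Int × Int) i =>
        let s := p.1 + PySem.List.pyGetD arr i 0 - PySem.List.pyGetD arr (i - k) 0
        (s, if s ≥ threshold then p.2 + 1 else p.2)) (s, ans)).2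

-- ===== PRECONDITION & SPEC =====
-- Pre_ excludes k < 0, where A raises IndexError (res[i] past the end once i exceeds len(res)-1).
def Pre_best_solution (arr : List Int) (k : Int) (threshold : Int) : Prop := 0 ≤ k
instance (arr : List Int) (k : Int) (threshold : Int) : Decidable (Pre_best_solution arr k threshold) := by unfold Pre_best_solution; infer_instance
def pvWitness_best_solution : List Int × Int × Int := ([2, 2, 2, 2, 5, 5, 5, 8], 3, 10)

def Spec_best_solution (arr : List Int) (k : Int) (threshold : Int) (out : Int) : Prop := out = best_solution_alt arr k threshold
instance (arr : List Int) (k : Int) (threshold : Int) (out : Int) : Decidable (Spec_best_solution arr k threshold out) := by unfold Spec_best_solution; infer_instance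

-- ===== CLAIM (what is proved, stated in full; the proofs are below) =====
def Claim_equal_best_solution : Prop := ∀ (arr : List Int) (k : Int) (threshold : Int), Dom_best_solution arr k threshold → Pre_best_solution arr k threshold → Spec_best_solution arr k threshold (best_solution arr k threshold)

-- ===== LEMMAS AND PROOFS =====

-- prefix sums: pvS arr m = sum of the first m elements (proof-only helper)
def pvS (arr : List Int) (m : Nat) : Int := (arr.take m).sum

theorem pvS_succ (arr : List Int) (j : Nat) (h : j < arr.length) :
    pvS arr (j + 1) = pvS arr j + arr.getD j 0 := by
  unfold pvS
  rw [List.sum_take_succ _ _ h, List.getD_eq_getElem _ _ h]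

-- A's first loop builds exactly the prefix-sum list
theorem pvBuild (arr : List Int) : ∀ (acc : List Int) (x : Int),
    arr.foldl (fun res v => res ++ [PySem.List.pyGetD res (-1) 0 + v]) (acc ++ [x])
      = acc ++ (List.range (arr.length + 1)).map (fun m => x + pvS arr m) := by
  induction arr with
  | nil => intro acc x; simp [pvS]
  | cons a t ih =>
      intro acc x
      have h1 : (acc ++ [x]) ++ [PySem.List.pyGetD (acc ++ [x]) (-1) 0 + a]
          = (acc ++ [x]) ++ [x + a] := by
        rw [PySem.List.pyGetD_neg_one_append_singleton]
      simp only [List.foldl_cons, h1]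
      rw [ih (acc ++ [x]) (x + a)]
      simp only [List.length_cons, List.range_succ_eq_map, List.map_cons, List.map_map]
      simp [pvS, Function.comp, List.append_assoc, add_assoc]

-- characterization of A as a window count
theorem pvA_eq (arr : List Int) (kn : Nat) (t : Int) :
    best_solution arr (kn : Int) t
      = ((List.range (arr.length + 1 - kn)).countP
          (fun i => decide (t ≤ pvS arr (i + kn) - pvS arr i)) : Int) := by
  unfold best_solution
  rw [PySem.List.foldl_pyRange_zero_pyGetD arr 0
    (fun res v => res ++ [PySem.List.pyGetD res (-1) 0 + v]) [(0:Int)]]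
  rw [show ([(0:Int)] = [] ++ [(0:Int)]) from rfl, pvBuild arr [] 0]
  simp only [List.nil_append, zero_add]
  simp only [PySem.List.len_eq, List.length_map, List.length_range]
  rw [PySem.List.pyRange_zero, Int.toNat_sub]
  rw [List.foldl_map]
  rw [PySem.List.foldl_congr_mem _ _
      (fun (ans : Int) (i : Nat) => if (decide (t ≤ pvS arr (i + kn) - pvS arr i)) = true then ans + 1 else ans) 0
      (by
        intro acc i hi
        rw [List.mem_range] at hi
        have h1 : (i : Int) + (kn : Int) = ((i + kn : Nat) : Int) := by push_cast; ring
        rw [h1, PySem.List.pyGetD_natCast, PySem.List.pyGetD_natCast,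
            PySem.List.getD_map_range _ _ _ _ (by omega),
            PySem.List.getD_map_range _ _ _ _ (by omega)]
        simp [ge_iff_le])]
  rw [PySem.List.foldl_count_if]
  simp
  

-- B's loop invariant
theorem pvB_loop (arr : List Int) (kn : Nat) (t : Int) :
    ∀ (m j : Nat) (c : Int), kn ≤ j → j + m = arr.length →
    ((PySem.List.pyRange (j : Int) (arr.length : Int) 1).foldl
      (fun (p : Int × Int) i =>
        let s := p.1 + PySem.List.pyGetD arr i 0 - PySem.List.pyGetD arr (i - (kn : Int)) 0
        (s, if s ≥ t then p.2 + 1 else p.2)) (pvS arr j - pvS arr (j - kn), c))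
      = (pvS arr arr.length - pvS arr (arr.length - kn),
         c + ((List.range m).countP (fun d => decide (t ≤ pvS arr (j + d + 1) - pvS arr (j + d + 1 - kn))) : Int)) := by
  intro m
  induction m with
  | zero =>
      intro j c hkj hjm
      have hj : j = arr.length := by omega
      subst hj
      rw [PySem.List.pyRange_one_eq_nil (le_refl _)]
      simp
  | succ m ih =>
      intro j c hkj hjm
      have hj : j < arr.length := by omega
      rw [PySem.List.pyRange_one_cons (by exact_mod_cast hj)]
      simp only [List.foldl_cons]
      have h2 : (j : Int) - (kn : Int) = ((j - kn : Nat) : Int) := by omega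
      rw [h2, PySem.List.pyGetD_natCast, PySem.List.pyGetD_natCast]
      have hs : pvS arr j - pvS arr (j - kn) + arr.getD j 0 - arr.getD (j - kn) 0
          = pvS arr (j + 1) - pvS arr (j + 1 - kn) := by
        have e1 : j + 1 - kn = (j - kn) + 1 := by omega
        rw [pvS_succ arr j hj, e1, pvS_succ arr (j - kn) (by omega)]
        ring
      simp only [hs]
      have ih' := ih (j + 1) (if pvS arr (j + 1) - pvS arr (j + 1 - kn) ≥ t then c + 1 else c) (by omega) (by omega)
      simp only [Nat.cast_add, Nat.cast_one] at ih'
      rw [ih']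
      have hcnt : (fun d => decide (t ≤ pvS arr (j + 1 + d + 1) - pvS arr (j + 1 + d + 1 - kn)))
          = (fun d => decide (t ≤ pvS arr (j + (d + 1) + 1) - pvS arr (j + (d + 1) + 1 - kn))) := by
        funext d
        have e1 : j + 1 + d + 1 = j + (d + 1) + 1 := by omega
        rw [e1]
      rw [hcnt]
      rw [List.range_succ_eq_map, List.countP_cons, List.countP_map]
      simp only [Function.comp_def, Nat.succ_eq_add_one, Nat.add_zero]
      split_ifs with h1 h2' <;> simp [ge_iff_le] at * <;> omega

theorem pvB_eq (arr : List Int) (kn : Nat) (t : Int) (hk : kn ≤ arr.length) :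
    best_solution_alt arr (kn : Int) t
      = ((List.range (arr.length + 1 - kn)).countP
          (fun i => decide (t ≤ pvS arr (i + kn) - pvS arr i)) : Int) := by
  unfold best_solution_alt
  simp only [PySem.List.len_eq]
  rw [if_neg (show ¬ ((kn : Int) > (arr.length : Int)) by omega)]
  rw [PySem.List.slice_to arr (by positivity)]
  simp only [Int.toNat_natCast]
  have e0 : ((arr.take kn).sum : Int) = pvS arr kn - pvS arr (kn - kn) := by simp [pvS]
  simp only [e0]
  rw [pvB_loop arr kn t (arr.length - kn) kn _ (le_refl _) (by omega)]
  have e1 : arr.length + 1 - kn = (arr.length - kn) + 1 := by omega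
  rw [e1, List.range_succ_eq_map, List.countP_cons, List.countP_map]
  have hcnt : ((fun i => decide (t ≤ pvS arr (i + kn) - pvS arr i)) ∘ Nat.succ)
      = (fun d => decide (t ≤ pvS arr (kn + d + 1) - pvS arr (kn + d + 1 - kn))) := by
    funext d
    have a1 : d + 1 + kn = kn + d + 1 := by omega
    have a2 : kn + d + 1 - kn = d + 1 := by omega
    simp only [Function.comp_def, Nat.succ_eq_add_one, a1, a2]
  rw [hcnt]
  have p0 : (0 : Nat) + kn = kn := by omega
  have p2 : pvS arr (kn - kn) = 0 := by
    have e : kn - kn = 0 := by omega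
    rw [e]; rfl
  have p1 : pvS arr 0 = 0 := rfl
  simp only [p0, p1, p2, decide_eq_true_eq, ge_iff_le]
  split_ifs <;> push_cast <;> omega

-- ===== VERDICT (by name: the statement is the Claim_ definition above) =====
theorem best_solution_spec : Claim_equal_best_solution := by
  intro arr k t _ hk
  unfold Spec_best_solution
  obtain ⟨kn, rfl⟩ : ∃ kn : Nat, k = (kn : Int) := ⟨k.toNat, (Int.toNat_of_nonneg hk).symm⟩
  by_cases hle : kn ≤ arr.length
  · rw [pvA_eq, pvB_eq arr kn t hle]
  · -- k > len(arr): both counts are over an empty range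
    have h1 : arr.length + 1 - kn = 0 := by omega
    rw [pvA_eq, h1]
    unfold best_solution_alt
    simp only [PySem.List.len_eq]
    rw [if_pos (by exact_mod_cast by omega : (kn : Int) > (arr.length : Int))]
    simp
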